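-- pv_equiv track=rewrite | github.com/NurbekSakiev/Algorithms | Number_of_paths_to_dest.py | num_of_paths_to_dest
-- ===== SOURCE A (Python) =====
-- def num_of_paths_to_dest(n):
--   matrix = [[0 for i in range(n)] for j in range(n)]
--
--   prevCol = [1 for i in range(n)]
--
--
--   for i in range(1, n):
--     currCol = [0 for k in range(n)]
--     for j in range(n):
--       if i > j:
--         continue
--       currCol[j] = currCol[j-1] + prevCol[j]
--     prevCol = currCol
--
--   return prevCol[n-1]
-- ===== SOURCE B (Python) =====
-- def num_of_paths_to_dest(n):
--   c = 1
--   for k in range(n - 1):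
--     c = c * 2 * (2 * k + 1) // (k + 2)
--   return c
-- ===== Notes on version B (the rewrite author's own statement) =====
-- stated objective: faster
-- what changed: Replaced the O(n^2) column-by-column lattice-path DP by the O(n) exact product recurrence for Catalan numbers, c_{k+1} = c_k*2*(2k+1)//(k+2).
-- outside the precondition, e.g. on num_of_paths_to_dest(0): A raises IndexError, B returns 1
import Mathlib
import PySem

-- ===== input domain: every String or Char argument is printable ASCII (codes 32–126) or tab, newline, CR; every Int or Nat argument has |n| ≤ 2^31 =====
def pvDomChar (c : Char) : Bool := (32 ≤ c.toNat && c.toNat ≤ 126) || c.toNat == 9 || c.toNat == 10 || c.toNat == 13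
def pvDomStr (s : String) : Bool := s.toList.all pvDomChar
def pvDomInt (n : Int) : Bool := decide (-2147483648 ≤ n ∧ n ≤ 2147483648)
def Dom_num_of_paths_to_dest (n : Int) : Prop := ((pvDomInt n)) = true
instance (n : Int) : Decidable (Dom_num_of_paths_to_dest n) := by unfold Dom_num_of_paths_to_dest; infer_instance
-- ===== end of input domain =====

-- B replaces A's O(n^2) column DP by the O(n) exact Catalan product recurrence (objective: faster, asymptotic).

-- ===== PORT A =====
def num_of_paths_to_dest (n : Int) : Int :=
  let _matrix := (PySem.List.pyRange 0 n 1).map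
    (fun _j => (PySem.List.pyRange 0 n 1).map (fun _i => (0 : Int)))
  let prevCol0 := (PySem.List.pyRange 0 n 1).map (fun _i => (1 : Int))
  let prevCol := (PySem.List.pyRange 1 n 1).foldl (fun prevCol i =>
    let currCol0 := (PySem.List.pyRange 0 n 1).map (fun _k => (0 : Int))
    (PySem.List.pyRange 0 n 1).foldl (fun currCol j =>
      if i > j then currCol
      else PySem.List.pySetD currCol j
        (PySem.List.pyGetD currCol (j - 1) 0 + PySem.List.pyGetD prevCol j 0)) currCol0)
    prevCol0
  -- prevCol[n-1]: for n ≤ 0 Python raises IndexError (outside Pre_); getD's default is unreachable under Pre_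
  PySem.List.pyGetD prevCol (n - 1) 0

-- ===== PORT B =====
def num_of_paths_to_dest_alt (n : Int) : Int :=
  (PySem.List.pyRange 0 (n - 1) 1).foldl
    (fun c k => PySem.Int.floordiv (c * 2 * (2 * k + 1)) (k + 2)) 1

-- ===== PRECONDITION & SPEC =====
-- Pre_ excludes exactly n ≤ 0, where A raises IndexError (prevCol[n-1] on an empty list).
def Pre_num_of_paths_to_dest (n : Int) : Prop := 1 ≤ n
instance (n : Int) : Decidable (Pre_num_of_paths_to_dest n) := by
  unfold Pre_num_of_paths_to_dest; infer_instance
def pvWitness_num_of_paths_to_dest : Int := 4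

def Spec_num_of_paths_to_dest (n : Int) (out : Int) : Prop := out = num_of_paths_to_dest_alt n
instance (n : Int) (out : Int) : Decidable (Spec_num_of_paths_to_dest n out) := by
  unfold Spec_num_of_paths_to_dest; infer_instance

-- ===== CLAIM (what is proved, stated in full; the proofs are below) =====
def Claim_equal_num_of_paths_to_dest : Prop := ∀ (n : Int), Dom_num_of_paths_to_dest n →
  Pre_num_of_paths_to_dest n → Spec_num_of_paths_to_dest n (num_of_paths_to_dest n)

-- ===== LEMMAS AND PROOFS =====

-- The ballot/Catalan triangle entry A's DP computes, in closed binomial form.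
def gB (i j : Nat) : Int := ((i + j).choose j : Int) - ((i + j).choose (j + 1) : Int)

def colL (i N : Nat) : List Int := (List.range N).map (fun j => if j < i then 0 else gB i j)

def partL (i m N : Nat) : List Int :=
  (List.range N).map (fun j => if j < i ∨ m ≤ j then 0 else gB i j)

lemma gB_zero (j : Nat) : gB 0 j = 1 := by
  simp [gB, Nat.choose_self]

lemma gB_pascal (i j : Nat) : gB (i + 1) (j + 1) = gB (i + 1) j + gB i (j + 1) := by
  have h1 : (i + 1) + (j + 1) = ((i + 1) + j) + 1 := by ring
  have h2 : i + (j + 1) = (i + 1) + j := by ring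
  simp only [gB, h1, h2, Nat.choose_succ_succ]
  push_cast; ring

lemma gB_diag_succ (i : Nat) : gB (i + 1) (i + 1) = gB i (i + 1) := by
  have h1 : (i + 1) + (i + 1) = (2 * i + 1) + 1 := by ring
  have h2 : i + (i + 1) = 2 * i + 1 := by ring
  have hsymm : (2 * i + 1).choose i = (2 * i + 1).choose (i + 1) := by
    have := Nat.choose_symm (n := 2 * i + 1) (k := i + 1) (by omega)
    have he : 2 * i + 1 - (i + 1) = i := by omega
    rw [he] at this
    omega
  simp only [gB, h1, h2, Nat.choose_succ_succ, hsymm]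
  push_cast; ring

lemma gB_diag_catalan (m : Nat) : gB m m = (catalan m : Int) := by
  have hkey : (m + 1) * (m + m).choose (m + 1) = m * (m + m).choose m := by
    have := Nat.choose_succ_right_eq (m + m) m
    have he : m + m - m = m := by omega
    rw [he] at this
    calc (m + 1) * (m + m).choose (m + 1) = (m + m).choose (m + 1) * (m + 1) := by ring
      _ = (m + m).choose m * m := this
      _ = m * (m + m).choose m := by ring
  have hcb : (m + 1) * catalan m = (m + m).choose m := by
    have := succ_mul_catalan_eq_centralBinom m
    rwa [Nat.centralBinom, two_mul] at this
  have hm1 : ((m : Int) + 1) ≠ 0 := by positivity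
  have : ((m : Int) + 1) * gB m m = ((m : Int) + 1) * (catalan m : Int) := by
    simp only [gB]
    have h1 : ((m : Int) + 1) * ((m + m).choose (m + 1) : Int) =
        (m : Int) * ((m + m).choose m : Int) := by exact_mod_cast hkey
    have h2 : ((m : Int) + 1) * ((catalan m : Nat) : Int) = ((m + m).choose m : Int) := by
      exact_mod_cast hcb
    rw [mul_sub, h1, h2]; ring
  exact mul_left_cancel₀ hm1 this

lemma catalan_step (k : Nat) :
    (k + 2) * catalan (k + 1) = 2 * (2 * k + 1) * catalan k := by
  have h1 := Nat.succ_mul_centralBinom_succ k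
  have h2 := succ_mul_catalan_eq_centralBinom k
  have h3 := succ_mul_catalan_eq_centralBinom (k + 1)
  have : (k + 1) * ((k + 2) * catalan (k + 1)) =
      (k + 1) * (2 * (2 * k + 1) * catalan k) := by
    calc (k + 1) * ((k + 2) * catalan (k + 1))
        = (k + 1) * ((k + 1 + 1) * catalan (k + 1)) := by ring_nf
      _ = (k + 1) * Nat.centralBinom (k + 1) := by rw [h3]
      _ = 2 * (2 * k + 1) * Nat.centralBinom k := h1
      _ = 2 * (2 * k + 1) * ((k + 1) * catalan k) := by rw [h2]
      _ = (k + 1) * (2 * (2 * k + 1) * catalan k) := by ring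
  exact Nat.eq_of_mul_eq_mul_left (by omega) this

-- B's loop computes catalan
lemma alt_loop (m : Nat) :
    (PySem.List.pyRange 0 (m : Int) 1).foldl
      (fun c k => PySem.Int.floordiv (c * 2 * (2 * k + 1)) (k + 2)) 1
      = (catalan m : Int) := by
  induction m with
  | zero => simp [PySem.List.pyRange_one_eq_nil, catalan_zero]
  | succ k ih =>
    have hsplit : PySem.List.pyRange 0 ((k : Int) + 1) 1 =
        PySem.List.pyRange 0 (k : Int) 1 ++ [(k : Int)] :=
      PySem.List.pyRange_one_succ_right (by positivity)
    have hcast : ((k : Int) + 1) = ((k + 1 : Nat) : Int) := by push_cast; ring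
    rw [← hcast, hsplit, List.foldl_append, ih]
    simp only [List.foldl_cons, List.foldl_nil]
    have hNat : catalan k * 2 * (2 * k + 1) = (k + 2) * catalan (k + 1) := by
      calc catalan k * 2 * (2 * k + 1) = 2 * (2 * k + 1) * catalan k := by ring
        _ = (k + 2) * catalan (k + 1) := (catalan_step k).symm
    have hstep : (catalan k : Int) * 2 * (2 * (k : Int) + 1) =
        ((k : Int) + 2) * (catalan (k + 1) : Int) := by exact_mod_cast hNat
    rw [hstep, PySem.Int.floordiv_eq_ediv_of_pos (by positivity),
      Int.mul_ediv_cancel_left _ (by positivity)]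

lemma partL_getD (i m N t : Nat) (ht : t < N) :
    (partL i m N).getD t 0 = if t < i ∨ m ≤ t then 0 else gB i t := by
  simp [partL, List.getD_eq_getElem?_getD, ht]

lemma colL_getD (i N t : Nat) (ht : t < N) :
    (colL i N).getD t 0 = if t < i then 0 else gB i t := by
  simp [colL, List.getD_eq_getElem?_getD, ht]

lemma partL_set (i m N : Nat) (hm : m < N) (hi : i ≤ m) :
    (partL i m N).set m (gB i m) = partL i (m + 1) N := by
  apply List.ext_getElem (by simp [partL])
  intro t h1 h2
  rcases eq_or_ne t m with rfl | hne
  · rw [List.getElem_set_self (by simp [partL]; omega)]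
    simp only [partL, List.getElem_map, List.getElem_range]
    have hc : ¬ (t < i ∨ t + 1 ≤ t) := by omega
    rw [if_neg hc]
  · rw [List.getElem_set_ne (by omega)]
    simp only [partL, List.getElem_map, List.getElem_range]
    exact if_congr (by omega) rfl rfl

-- inner loop of A, processed up to j < m, starting from the all-zeros column
lemma inner_loop (N i m : Nat) (hi : 1 ≤ i) (hm : m ≤ N) :
    (PySem.List.pyRange 0 (m : Int) 1).foldl
      (fun currCol j =>
        if (i : Int) > j then currCol
        else PySem.List.pySetD currCol j
          (PySem.List.pyGetD currCol (j - 1) 0 +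
           PySem.List.pyGetD (colL (i - 1) N) j 0)) (partL i 0 N)
      = partL i m N := by
  induction m with
  | zero => rfl
  | succ m ih =>
    have hsplit : PySem.List.pyRange 0 ((m : Int) + 1) 1 =
        PySem.List.pyRange 0 (m : Int) 1 ++ [(m : Int)] :=
      PySem.List.pyRange_one_succ_right (by positivity)
    have hcast : ((m : Int) + 1) = ((m + 1 : Nat) : Int) := by push_cast; ring
    rw [← hcast, hsplit, List.foldl_append, ih (by omega)]
    simp only [List.foldl_cons, List.foldl_nil]
    by_cases hlt : m < i
    · -- branch taken: column unchanged; partL i m N = partL i (m+1) N here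
      have hgt : (i : Int) > (m : Int) := by exact_mod_cast hlt
      rw [if_pos hgt]
      apply List.ext_getElem (by simp [partL])
      intro t h1 h2
      simp only [partL, List.getElem_map, List.getElem_range]
      exact if_congr (by omega) rfl rfl
    · have hgt : ¬ ((i : Int) > (m : Int)) := by
        simp only [gt_iff_lt, not_lt]; exact_mod_cast not_lt.mp hlt
      rw [if_neg hgt]
      have him : i ≤ m := not_lt.mp hlt
      have hm1 : 1 ≤ m := le_trans hi him
      -- the value written is gB i m
      have hj1 : (m : Int) - 1 = ((m - 1 : Nat) : Int) := by push_cast [hm1]; ring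
      have hcurr : PySem.List.pyGetD (partL i m N) ((m : Int) - 1) 0 =
          if m - 1 < i then 0 else gB i (m - 1) := by
        rw [hj1, PySem.List.pyGetD_natCast, partL_getD i m N (m - 1) (by omega)]
        exact if_congr (by omega) rfl rfl
      have hprev : PySem.List.pyGetD (colL (i - 1) N) (m : Int) 0 = gB (i - 1) m := by
        rw [PySem.List.pyGetD_natCast, colL_getD (i - 1) N m (by omega)]
        have : ¬ m < i - 1 := by omega
        rw [if_neg this]
      rw [hcurr, hprev, PySem.List.pySetD_natCast]
      have hval : (if m - 1 < i then 0 else gB i (m - 1)) + gB (i - 1) m = gB i m := by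
        rcases eq_or_lt_of_le him with heq | hlt2
        · -- m = i : 0 + gB (i-1) i = gB i i
          have hlt : m - 1 < i := by omega
          rw [if_pos hlt, zero_add]
          obtain ⟨i', rfl⟩ : ∃ i', m = i' + 1 := ⟨m - 1, by omega⟩
          have : i = i' + 1 := by omega
          subst this
          simp only [Nat.add_sub_cancel]
          exact (gB_diag_succ i').symm
        · -- i < m : gB i (m-1) + gB (i-1) m = gB i m  (Pascal)
          have : ¬ (m - 1 < i) := by omega
          rw [if_neg this]
          obtain ⟨i', rfl⟩ : ∃ i', i = i' + 1 := ⟨i - 1, by omega⟩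
          obtain ⟨m', rfl⟩ : ∃ m', m = m' + 1 := ⟨m - 1, by omega⟩
          simp only [Nat.add_sub_cancel]
          exact (gB_pascal i' m').symm
      rw [hval]
      exact partL_set i m N (by omega) him

lemma zeros_eq_partL (N i : Nat) :
    (PySem.List.pyRange 0 (N : Int) 1).map (fun _ => (0 : Int)) = partL i 0 N := by
  apply List.ext_getElem (by simp [partL, PySem.List.length_pyRange_one])
  intro t h1 h2
  simp only [partL, List.getElem_map, List.getElem_range]
  rw [if_pos (Or.inr (Nat.zero_le t))]

lemma partL_N_eq_colL (i N : Nat) : partL i N N = colL i N := by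
  apply List.ext_getElem (by simp [partL, colL])
  intro t h1 h2
  simp only [partL, List.length_map, List.length_range] at h1
  simp only [partL, colL, List.getElem_map, List.getElem_range]
  exact if_congr (by omega) rfl rfl

lemma init_eq_colL (N : Nat) :
    (PySem.List.pyRange 0 (N : Int) 1).map (fun _ => (1 : Int)) = colL 0 N := by
  apply List.ext_getElem (by simp [colL, PySem.List.length_pyRange_one])
  intro t h1 h2
  simp only [colL, List.getElem_map, List.getElem_range, gB_zero]
  simp

-- outer loop of A: after iterations 1 .. i, the column is colL i N
lemma outer_loop (N : Nat) (i : Nat) :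
    (PySem.List.pyRange 1 ((i : Int) + 1) 1).foldl (fun prevCol ii =>
      (PySem.List.pyRange 0 (N : Int) 1).foldl
        (fun currCol j =>
          if ii > j then currCol
          else PySem.List.pySetD currCol j
            (PySem.List.pyGetD currCol (j - 1) 0 +
             PySem.List.pyGetD prevCol j 0))
        ((PySem.List.pyRange 0 (N : Int) 1).map (fun _k => (0 : Int))))
      (colL 0 N)
      = colL i N := by
  induction i with
  | zero => simp [PySem.List.pyRange_one_eq_nil]
  | succ i ih =>
    have hsplit : PySem.List.pyRange 1 (((i : Int) + 1) + 1) 1 =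
        PySem.List.pyRange 1 ((i : Int) + 1) 1 ++ [(i : Int) + 1] :=
      PySem.List.pyRange_one_succ_right (by omega)
    push_cast
    rw [hsplit, List.foldl_append, ih]
    simp only [List.foldl_cons, List.foldl_nil]
    have hcast : ((i : Int) + 1) = ((i + 1 : Nat) : Int) := by push_cast; ring
    rw [hcast, zeros_eq_partL N (i + 1)]
    have hcol : colL i N = colL ((i + 1) - 1) N := by simp
    rw [hcol]
    have := inner_loop N (i + 1) N (by omega) (le_refl N)
    rw [this, partL_N_eq_colL]

-- A computes catalan (N-1) for n = N ≥ 1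
lemma a_eq_catalan (N : Nat) (hN : 1 ≤ N) :
    num_of_paths_to_dest (N : Int) = (catalan (N - 1) : Int) := by
  unfold num_of_paths_to_dest
  simp only []
  rw [init_eq_colL N]
  have hcast : (N : Int) = ((N - 1 : Nat) : Int) + 1 := by push_cast [hN]; ring
  rw [show PySem.List.pyRange 1 (N : Int) 1 =
      PySem.List.pyRange 1 (((N - 1 : Nat) : Int) + 1) 1 by rw [← hcast]]
  rw [outer_loop N (N - 1)]
  have hidx : (N : Int) - 1 = ((N - 1 : Nat) : Int) := by push_cast [hN]; ring
  rw [hidx, PySem.List.pyGetD_natCast, colL_getD (N - 1) N (N - 1) (by omega)]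
  simp [gB_diag_catalan]

lemma alt_eq_catalan (N : Nat) (hN : 1 ≤ N) :
    num_of_paths_to_dest_alt (N : Int) = (catalan (N - 1) : Int) := by
  unfold num_of_paths_to_dest_alt
  have hidx : (N : Int) - 1 = ((N - 1 : Nat) : Int) := by push_cast [hN]; ring
  rw [hidx, alt_loop]

-- ===== VERDICT (by name: the statement is the Claim_ definition above) =====
theorem num_of_paths_to_dest_spec : Claim_equal_num_of_paths_to_dest := by
  intro n _ hpre
  unfold Spec_num_of_paths_to_dest
  have hn : 1 ≤ n := hpre
  obtain ⟨N, rfl⟩ : ∃ N : Nat, n = (N : Int) := ⟨n.toNat, by omega⟩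
  have hN : 1 ≤ N := by exact_mod_cast hn
  rw [a_eq_catalan N hN, alt_eq_catalan N hN]
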